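-- pv_equiv track=rewrite | github.com/pypi-data/pypi-mirror-383 | packages/mkdocs-document-dates/mkdocs_document_dates-3.4.5.tar.gz/mkdocs_document_dates-3.4.5/mkdocs_document_dates/plugin.py | find_markdown_body_start
-- ===== SOURCE A (Python) =====
-- def find_markdown_body_start(text: str):
--     pos = 0
--     length = len(text)
--     in_comment = False
--     WHITESPACE = {' ', '\t', '\r', '\n'}
--
--     while pos < length:
--         next_newline = text.find('\n', pos)
--         if next_newline == -1:
--             next_newline = length
--
--         start = pos
--         while start < next_newline and text[start] in WHITESPACE:
--             start += 1
--
--         if start < next_newline: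
--             if not in_comment:
--                 if text.startswith('<!--', start):
--                     in_comment = True
--                     start += 4
--
--             if in_comment:
--                 comment_end = text.find('-->', start, next_newline)
--                 if comment_end != -1:
--                     in_comment = False
--                     pos = comment_end + 3
--                     continue
--                 pos = next_newline + 1
--                 continue
--
--             # 找到正文行
--             return text[start:next_newline], next_newline + 1 if next_newline < length else length
--
--         pos = next_newline + 1
--
--     return '', length
-- ===== SOURCE B (Python) =====
-- def find_markdown_body_start(text: str):
--     n = len(text)
--     i = 0
--     in_comment = False
--     while i < n:
--         if in_comment:
--             if text[i:i+3] == '-->':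
--                 in_comment = False
--                 i += 3
--             else:
--                 i += 1
--         elif text[i] in ' \t\r\n':
--             i += 1
--         elif text[i:i+4] == '<!--':
--             in_comment = True
--             i += 4
--         else:
--             nl = text.find('\n', i)
--             if nl == -1:
--                 return text[i:], n
--             return text[i:nl], nl + 1
--     return '', n
-- ===== Notes on version B (the rewrite author's own statement) =====
-- stated objective: alternative
-- what changed: A scans line by line: it locates the next newline, strips leading whitespace with an inner loop, and searches for the comment close within the current line only; B is a single flat character-level state machine that walks the text once, matching the comment open/close markers in place with no per-line structure.
import Mathlib
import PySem

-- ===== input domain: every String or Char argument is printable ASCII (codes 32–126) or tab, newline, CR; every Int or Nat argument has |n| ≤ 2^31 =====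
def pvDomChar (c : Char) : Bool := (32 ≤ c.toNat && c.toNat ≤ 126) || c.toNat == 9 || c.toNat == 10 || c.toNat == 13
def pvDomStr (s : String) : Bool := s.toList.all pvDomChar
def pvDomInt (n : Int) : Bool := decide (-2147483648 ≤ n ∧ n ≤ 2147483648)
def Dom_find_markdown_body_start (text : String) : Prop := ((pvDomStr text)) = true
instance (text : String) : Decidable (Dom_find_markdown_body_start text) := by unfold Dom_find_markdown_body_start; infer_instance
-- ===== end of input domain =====

-- B replaces A's line-by-line scan (newline search + inner whitespace-strip loop + line-bounded
-- search for the comment close) by a single flat character-level state machine; same value, alternative structure.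


-- ===== PORT A =====
-- membership in A's WHITESPACE = {' ', '\t', '\r', '\n'}
def pvWsA (c : Char) : Bool := c = ' ' || c = '\t' || c = '\r' || c = '\n'

-- A's inner while loop: `while start < next_newline and text[start] in WHITESPACE: start += 1`
-- (text[start] ported as getD: the guard start < next_newline ≤ len(text) keeps the index in range)
def pvSkipA (cs : List Char) (bound : Nat) (start : Nat) : Nat :=
  if h : start < bound ∧ pvWsA (cs.getD start ' ') then pvSkipA cs bound (start + 1) else start
termination_by bound - start
decreasing_by omega

-- `next_newline = text.find('\n', pos); if next_newline == -1: next_newline = length`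
def pvNN (cs : List Char) (pos : Nat) : Nat :=
  if PySem.Chars.findFrom cs ['\n'] (pos : Int) = -1 then cs.length
  else (PySem.Chars.findFrom cs ['\n'] (pos : Int)).toNat

-- the next three lemmas are cited by pvLoopA's `decreasing_by` (A's loop position strictly grows)
theorem pv_find_nonneg (s sub : List Char) (h : ¬ (PySem.Chars.find s sub = -1)) :
    0 ≤ PySem.Chars.find s sub := by
  have := PySem.Chars.neg_one_le_find s sub; omega

theorem pvFindFromSome_ge (cs sub : List Char) (k : Nat) (e? : Option Int)
    (h : PySem.Chars.findFrom cs sub (k : Int) e? ≠ -1) :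
    (k : Int) ≤ PySem.Chars.findFrom cs sub (k : Int) e? := by
  have hk : ¬ ((k : Int) < 0) := by omega
  rcases e? with _ | e <;>
  · simp only [PySem.Chars.findFrom, hk, if_false, Int.toNat_natCast] at *
    split_ifs at h ⊢ <;>
      first
        | omega
        | (have := pv_find_nonneg (List.drop k (List.take _ cs)) sub (by assumption); omega)

theorem pvSkipA_ge (cs : List Char) (bound start : Nat) : start ≤ pvSkipA cs bound start := by
  unfold pvSkipA
  split
  · have := pvSkipA_ge cs bound (start + 1); omega
  · omega
termination_by bound - start
decreasing_by omega

theorem pvNN_ge (cs : List Char) (pos : Nat) (h : pos < cs.length) : pos ≤ pvNN cs pos := by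
  unfold pvNN
  split
  · omega
  · have := pvFindFromSome_ge cs ['\n'] pos none (by assumption)
    omega

-- A's outer while loop, one parameter per mutable Python variable
def pvLoopA (cs : List Char) (pos : Nat) (in_comment : Bool) : String × Int :=
  if hp : pos < cs.length then
    let next_newline := pvNN cs pos
    let start := pvSkipA cs next_newline pos
    if hs : start < next_newline then
      -- Python sets in_comment/start inside `if not in_comment`; ported as a joint update
      let opened := !in_comment && PySem.Chars.startswith (cs.drop start) ['<', '!', '-', '-']
      let in_comment' := in_comment || opened
      let start' := if opened then start + 4 else start
      if in_comment' then
        let comment_end := PySem.Chars.findFrom cs ['-', '-', '>'] (start' : Int) (some (next_newline : Int))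
        if hc : comment_end ≠ -1 then
          pvLoopA cs (comment_end.toNat + 3) false
        else
          pvLoopA cs (next_newline + 1) true
      else
        (String.ofList (PySem.Chars.slice cs (some (start' : Int)) (some (next_newline : Int))),
         if next_newline < cs.length then (next_newline : Int) + 1 else (cs.length : Int))
    else
      pvLoopA cs (next_newline + 1) in_comment
  else
    ("", (cs.length : Int))
termination_by cs.length - pos
decreasing_by
  · show cs.length - (comment_end.toNat + 3) < cs.length - pos
    have h1 : pos ≤ start := pvSkipA_ge cs next_newline pos
    have h2 : (start' : Int) ≤ comment_end :=
      pvFindFromSome_ge cs ['-', '-', '>'] start' (some ((next_newline : Nat) : Int)) hc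
    have h3 : start ≤ start' := by
      show start ≤ if _ : opened = true then start + 4 else start
      split <;> omega
    omega
  · have := pvNN_ge cs pos hp
    omega
  · have := pvNN_ge cs pos hp
    omega

def find_markdown_body_start (text : String) : String × Int :=
  pvLoopA text.toList 0 false

-- ===== PORT B =====
-- membership test `text[i] in ' \t\r\n'` (one-char needle: substring = char membership)
def pvWsB (c : Char) : Bool := c = ' ' || c = '\t' || c = '\r' || c = '\n'

-- B's single while loop: one position at a time, flat state machine
def pvLoopB (cs : List Char) (i : Nat) (in_comment : Bool) : String × Int :=
  if hp : i < cs.length then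
    if in_comment then
      if PySem.Chars.slice cs (some (i : Int)) (some ((i : Int) + 3)) = ['-', '-', '>'] then
        pvLoopB cs (i + 3) false
      else
        pvLoopB cs (i + 1) true
    else if pvWsB (cs.getD i ' ') then
      pvLoopB cs (i + 1) false
    else if PySem.Chars.slice cs (some (i : Int)) (some ((i : Int) + 4)) = ['<', '!', '-', '-'] then
      pvLoopB cs (i + 4) true
    else
      let nl := PySem.Chars.findFrom cs ['\n'] (i : Int)
      if nl = -1 then
        (String.ofList (PySem.Chars.slice cs (some (i : Int))), (cs.length : Int))
      else
        (String.ofList (PySem.Chars.slice cs (some (i : Int)) (some nl)), nl + 1)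
  else
    ("", (cs.length : Int))
termination_by cs.length - i
decreasing_by all_goals omega

def find_markdown_body_start_alt (text : String) : String × Int :=
  pvLoopB text.toList 0 false

-- ===== PRECONDITION & SPEC =====
def Spec_find_markdown_body_start (text : String) (out : String × Int) : Prop := out = find_markdown_body_start_alt text
instance (text : String) (out : String × Int) : Decidable (Spec_find_markdown_body_start text out) := by unfold Spec_find_markdown_body_start; infer_instance

-- ===== CLAIM (what is proved, stated in full; the proofs are below) =====
def Claim_equal_find_markdown_body_start : Prop := ∀ (text : String), Dom_find_markdown_body_start text → Spec_find_markdown_body_start text (find_markdown_body_start text)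

-- ===== LEMMAS AND PROOFS =====

theorem pv_single_prefix (cs : List Char) (j : Nat) (c : Char) :
    ([c] <+: cs.drop j) ↔ cs[j]? = some c := by
  constructor
  · rintro ⟨t, ht⟩
    have : (cs.drop j).head? = some c := by rw [← ht]; rfl
    rwa [List.head?_drop] at this
  · intro h
    have : (cs.drop j).head? = some c := by rwa [List.head?_drop]
    rcases hd : cs.drop j with _ | ⟨a, t⟩
    · simp [hd] at this
    · rw [hd] at this
      simp at this
      exact ⟨t, by simp [this]⟩

theorem pv_prefix_getElem (cs p : List Char) (j t : Nat) (h : p <+: cs.drop j)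
    (ht : t < p.length) : cs[j + t]? = some p[t] := by
  obtain ⟨r, hr⟩ := h
  rw [← List.getElem?_drop, ← hr, List.getElem?_append_left (by omega),
    List.getElem?_eq_getElem ht]

theorem pv_lt_of_getElem? (cs : List Char) (j : Nat) (c : Char) (h : cs[j]? = some c) :
    j < cs.length := by
  by_contra hge
  rw [List.getElem?_eq_none (by omega)] at h
  simp at h

theorem pvFind_eq (s sub : List Char) (m : Nat) (hpre : sub <+: s.drop m)
    (hmin : ∀ i, i < m → ¬ sub <+: s.drop i) : PySem.Chars.find s sub = (m : Int) := by
  have hinf : sub <:+: s := hpre.isInfix.trans (List.drop_suffix m s).isInfix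
  have h0 : 0 ≤ PySem.Chars.find s sub := (PySem.Chars.find_nonneg_iff s sub).2 hinf
  obtain ⟨h1, h2⟩ := PySem.Chars.find_spec h0
  rcases Nat.lt_trichotomy (PySem.Chars.find s sub).toNat m with h | h | h
  · exact absurd h1 (hmin _ h)
  · omega
  · exact absurd hpre (h2 m h)

theorem pvFind_neg (s sub : List Char) (h : ∀ i, ¬ sub <+: s.drop i) :
    PySem.Chars.find s sub = -1 := by
  rw [PySem.Chars.find_eq_neg_one_iff]
  intro hinf
  have := (PySem.Chars.isIn_iff_infix sub s).2 hinf
  obtain ⟨j, hj⟩ := (PySem.Chars.exists_prefix_drop_iff_isIn sub s).2 this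
  exact h j hj

theorem pvNN_spec (cs : List Char) (pos : Nat) (h : pos ≤ cs.length) :
    pos ≤ pvNN cs pos ∧ pvNN cs pos ≤ cs.length ∧
      (∀ i, pos ≤ i → i < pvNN cs pos → cs[i]? ≠ some '\n') ∧
      (pvNN cs pos = cs.length ∨ cs[pvNN cs pos]? = some '\n') := by
  unfold pvNN
  rw [PySem.Chars.findFrom_natCast cs ['\n'] pos h]
  by_cases hf : PySem.Chars.find (cs.drop pos) ['\n'] = -1
  · simp only [hf, reduceIte]
    refine ⟨h, le_refl _, ?_, Or.inl trivial⟩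
    intro i hpi hil hni
    rw [PySem.Chars.find_eq_neg_one_iff] at hf
    apply hf
    have : ['\n'] <+: cs.drop i := (pv_single_prefix cs i '\n').2 hni
    have h2 : cs.drop i = (cs.drop pos).drop (i - pos) := by
      rw [List.drop_drop]; congr 1; omega
    rw [h2] at this
    exact this.isInfix.trans (List.drop_suffix _ _).isInfix
  · have h0 := pv_find_nonneg _ ['\n'] hf
    obtain ⟨h1, h2⟩ := PySem.Chars.find_spec h0
    set f := PySem.Chars.find (cs.drop pos) ['\n'] with hfdef
    have hne : ¬ ((pos : Int) + f = -1) := by omega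
    simp only [if_neg hf, if_neg hne]
    have htn : ((pos : Int) + f).toNat = pos + f.toNat := by omega
    rw [htn]
    clear hne htn
    rw [List.drop_drop] at h1
    have hnl : cs[pos + f.toNat]? = some '\n' := (pv_single_prefix cs _ '\n').1 h1
    have hlt : pos + f.toNat < cs.length := by
      by_contra hge
      rw [List.getElem?_eq_none (by omega)] at hnl
      simp at hnl
    refine ⟨by omega, by omega, ?_, Or.inr hnl⟩
    intro i hpi hil hni
    have : ['\n'] <+: (cs.drop pos).drop (i - pos) := by
      rw [List.drop_drop, show pos + (i - pos) = i by omega]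
      exact (pv_single_prefix cs i '\n').2 hni
    exact h2 (i - pos) (by omega) this

theorem pvNN_unique (cs : List Char) (pos m : Nat) (h : pos ≤ cs.length)
    (h1 : pos ≤ m) (h2 : m ≤ cs.length)
    (h3 : ∀ i, pos ≤ i → i < m → cs[i]? ≠ some '\n')
    (h4 : m = cs.length ∨ cs[m]? = some '\n') : pvNN cs pos = m := by
  obtain ⟨g1, g2, g3, g4⟩ := pvNN_spec cs pos h
  rcases Nat.lt_trichotomy (pvNN cs pos) m with hlt | heq | hgt
  · exfalso
    rcases g4 with ge | gnl
    · omega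
    · exact h3 _ g1 hlt gnl
  · exact heq
  · exfalso
    rcases h4 with he | hnl
    · omega
    · exact g3 _ h1 hgt hnl

theorem pvNN_congr (cs : List Char) (pos k : Nat) (hpk : pos ≤ k) (hk : k ≤ cs.length)
    (hmid : ∀ i, pos ≤ i → i < k → cs[i]? ≠ some '\n') : pvNN cs pos = pvNN cs k := by
  obtain ⟨g1, g2, g3, g4⟩ := pvNN_spec cs k hk
  refine pvNN_unique cs pos _ (by omega) (by omega) g2 ?_ g4
  intro i hpi hil
  by_cases hik : i < k
  · exact hmid i hpi hik
  · exact g3 i (by omega) hil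

-- `nl = text.find('\n', pos)` against the corrected next_newline value
theorem pvNN_cases (cs : List Char) (pos : Nat) (h : pos ≤ cs.length) :
    (PySem.Chars.findFrom cs ['\n'] (pos : Int) = -1 ∧ pvNN cs pos = cs.length) ∨
    (PySem.Chars.findFrom cs ['\n'] (pos : Int) = ((pvNN cs pos : Nat) : Int) ∧
      pvNN cs pos < cs.length) := by
  by_cases hf : PySem.Chars.findFrom cs ['\n'] (pos : Int) = -1
  · left; exact ⟨hf, by unfold pvNN; rw [if_pos hf]⟩
  · right
    have hge := pvFindFromSome_ge cs ['\n'] pos none hf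
    have hv : pvNN cs pos = (PySem.Chars.findFrom cs ['\n'] (pos : Int)).toNat := by
      unfold pvNN; rw [if_neg hf]
    obtain ⟨g1, g2, g3, g4⟩ := pvNN_spec cs pos h
    constructor
    · omega
    · rcases g4 with ge | gnl
      · exfalso
        rw [PySem.Chars.findFrom_natCast cs ['\n'] pos h] at hf hge hv
        by_cases hff : PySem.Chars.find (cs.drop pos) ['\n'] = -1
        · exact hf (by rw [hff]; simp)
        · have h0 := pv_find_nonneg _ ['\n'] hff
          obtain ⟨h1, _⟩ := PySem.Chars.find_spec h0
          rw [List.drop_drop] at h1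
          have hnl := (pv_single_prefix cs _ '\n').1 h1
          have : pos + (PySem.Chars.find (cs.drop pos) ['\n']).toNat < cs.length := by
            by_contra hge2
            rw [List.getElem?_eq_none (by omega)] at hnl
            simp at hnl
          simp only [if_neg hff] at hv
          omega
      · exact pv_lt_of_getElem? cs _ '\n' gnl

theorem pv_prefix_drop_take (cs sub : List Char) (e k : Nat) :
    (sub <+: (cs.take e).drop k) ↔ sub <+: cs.drop k ∧ sub.length ≤ e - k := by
  rw [List.drop_take, List.prefix_take_iff]

theorem pvBF_unfold (cs sub : List Char) (k e : Nat) (hke : k ≤ e) (he : e ≤ cs.length) :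
    PySem.Chars.findFrom cs sub (k : Int) (some (e : Int)) =
      if PySem.Chars.find ((cs.take e).drop k) sub = -1 then -1
      else (k : Int) + PySem.Chars.find ((cs.take e).drop k) sub := by
  simp only [PySem.Chars.findFrom]
  have h1 : ¬ ((cs.length : Int) < (e : Int)) := by omega
  have h2 : ¬ ((e : Int) < 0) := by omega
  have h3 : ¬ ((k : Int) < 0) := by omega
  simp only [h1, h2, h3, if_false, Int.toNat_natCast]
  have h4 : ¬ ((e : Int) < (k : Int)) := by omega
  simp only [h4, if_false]

theorem pvBF_eq (cs sub : List Char) (k e m : Nat) (hke : k ≤ e) (he : e ≤ cs.length)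
    (hm : k ≤ m) (hme : m + sub.length ≤ e) (hpre : sub <+: cs.drop m)
    (hmin : ∀ j, k ≤ j → j < m → ¬(sub <+: cs.drop j ∧ j + sub.length ≤ e)) :
    PySem.Chars.findFrom cs sub (k : Int) (some (e : Int)) = (m : Int) := by
  rw [pvBF_unfold cs sub k e hke he]
  have hf : PySem.Chars.find ((cs.take e).drop k) sub = ((m - k : Nat) : Int) := by
    apply pvFind_eq
    · rw [List.drop_drop, pv_prefix_drop_take]
      rw [show k + (m - k) = m by omega]
      exact ⟨hpre, by omega⟩
    · intro i hi hp
      rw [List.drop_drop, pv_prefix_drop_take] at hp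
      exact hmin (k + i) (by omega) (by omega) ⟨hp.1, by omega⟩
  rw [hf]
  have : ¬ (((m - k : Nat) : Int) = -1) := by omega
  rw [if_neg this]
  omega

theorem pvBF_neg (cs sub : List Char) (k e : Nat) (hsub : sub ≠ []) (hke : k ≤ e)
    (he : e ≤ cs.length)
    (hall : ∀ j, k ≤ j → j + sub.length ≤ e → ¬ sub <+: cs.drop j) :
    PySem.Chars.findFrom cs sub (k : Int) (some (e : Int)) = -1 := by
  rw [pvBF_unfold cs sub k e hke he]
  have hf : PySem.Chars.find ((cs.take e).drop k) sub = -1 := by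
    apply pvFind_neg
    intro i hp
    rw [List.drop_drop, pv_prefix_drop_take] at hp
    have hlen : 0 < sub.length := List.length_pos_of_ne_nil hsub
    obtain ⟨hp1, hp2⟩ := hp
    exact hall (k + i) (by omega) (by omega) hp1
  rw [hf, if_pos rfl]

theorem pvBF_spec (cs sub : List Char) (k e : Nat) (hsub : sub ≠ []) (hke : k ≤ e)
    (he : e ≤ cs.length) :
    (PySem.Chars.findFrom cs sub (k : Int) (some (e : Int)) = -1 ∧
      ∀ j, k ≤ j → j + sub.length ≤ e → ¬ sub <+: cs.drop j) ∨
    (∃ m : Nat, PySem.Chars.findFrom cs sub (k : Int) (some (e : Int)) = (m : Int) ∧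
      k ≤ m ∧ m + sub.length ≤ e ∧ sub <+: cs.drop m ∧
      ∀ j, k ≤ j → j < m → ¬(sub <+: cs.drop j ∧ j + sub.length ≤ e)) := by
  by_cases hf : PySem.Chars.find ((cs.take e).drop k) sub = -1
  · left
    constructor
    · rw [pvBF_unfold cs sub k e hke he, hf, if_pos rfl]
    · intro j hj hje hp
      rw [PySem.Chars.find_eq_neg_one_iff] at hf
      apply hf
      have : sub <+: ((cs.take e).drop k).drop (j - k) := by
        rw [List.drop_drop, pv_prefix_drop_take, show k + (j - k) = j by omega]
        exact ⟨hp, by omega⟩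
      exact this.isInfix.trans (List.drop_suffix _ _).isInfix
  · right
    have h0 := pv_find_nonneg _ sub hf
    obtain ⟨h1, h2⟩ := PySem.Chars.find_spec h0
    set f := PySem.Chars.find ((cs.take e).drop k) sub with hfd
    rw [List.drop_drop, pv_prefix_drop_take] at h1
    have hlen : 0 < sub.length := List.length_pos_of_ne_nil hsub
    obtain ⟨h11, h12⟩ := h1
    refine ⟨k + f.toNat, ?_, by omega, by omega, h11, ?_⟩
    · rw [pvBF_unfold cs sub k e hke he, ← hfd, if_neg hf]
      omega
    · intro j hj hjm hp
      apply h2 (j - k) (by omega)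
      rw [List.drop_drop, pv_prefix_drop_take, show k + (j - k) = j by omega]
      exact ⟨hp.1, by omega⟩

theorem pvBF_congr (cs sub : List Char) (k k' e : Nat) (hsub : sub ≠ []) (hkk : k ≤ k')
    (hk'e : k' ≤ e) (he : e ≤ cs.length)
    (hmid : ∀ j, k ≤ j → j < k' → ¬(sub <+: cs.drop j ∧ j + sub.length ≤ e)) :
    PySem.Chars.findFrom cs sub (k : Int) (some (e : Int)) =
    PySem.Chars.findFrom cs sub (k' : Int) (some (e : Int)) := by
  rcases pvBF_spec cs sub k' e hsub hk'e he with ⟨hv, hall⟩ | ⟨m, hv, hm1, hm2, hm3, hm4⟩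
  · rw [hv]
    apply pvBF_neg cs sub k e hsub (by omega) he
    intro j hj hje
    by_cases hjk : j < k'
    · intro hp; exact hmid j hj hjk ⟨hp, hje⟩
    · exact hall j (by omega) hje
  · rw [hv]
    apply pvBF_eq cs sub k e m (by omega) he (by omega) hm2 hm3
    intro j hj hjm
    by_cases hjk : j < k'
    · exact hmid j hj hjk
    · exact hm4 j (by omega) hjm

-- whitespace-skip loop facts
theorem pvSkipA_le (cs : List Char) (bound start : Nat) (h : start ≤ bound) :
    pvSkipA cs bound start ≤ bound := by
  unfold pvSkipA
  split
  · exact pvSkipA_le cs bound (start + 1) (by omega)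
  · omega
termination_by bound - start
decreasing_by omega

theorem pvSkipA_ws (cs : List Char) (bound start : Nat) :
    ∀ i, start ≤ i → i < pvSkipA cs bound start → pvWsA (cs.getD i ' ') = true := by
  intro i h1 h2
  rw [pvSkipA] at h2
  split at h2
  · rcases Nat.eq_or_lt_of_le h1 with he | hlt
    · subst he; tauto
    · exact pvSkipA_ws cs bound (start + 1) i hlt h2
  · omega
termination_by bound - start
decreasing_by omega

theorem pvSkipA_eq (cs : List Char) (bound start : Nat)
    (h : ¬(start < bound ∧ pvWsA (cs.getD start ' ') = true)) :
    pvSkipA cs bound start = start := by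
  rw [pvSkipA, dif_neg h]

theorem pvSkipA_step (cs : List Char) (bound start : Nat) (h1 : start < bound)
    (h2 : pvWsA (cs.getD start ' ') = true) :
    pvSkipA cs bound start = pvSkipA cs bound (start + 1) := by
  rw [pvSkipA, dif_pos ⟨h1, h2⟩]

-- character-class facts
theorem pv_ws_not_newline (c : Char) (h : pvWsA c = false) : c ≠ '\n' := by
  intro he; subst he; simp [pvWsA] at h

theorem pv_getD_of_getElem? (cs : List Char) (j : Nat) (c : Char) (h : cs[j]? = some c) :
    cs.getD j ' ' = c := by
  rw [List.getD_eq_getElem?_getD, h]; rfl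

theorem pv_ws_not_trip (cs : List Char) (j : Nat) (h : pvWsA (cs.getD j ' ') = true) :
    ¬ ['-', '-', '>'] <+: cs.drop j := by
  intro hp
  have h0 : cs[j + 0]? = some '-' := pv_prefix_getElem cs _ j 0 hp (by norm_num)
  rw [Nat.add_zero] at h0
  rw [pv_getD_of_getElem? cs j '-' h0] at h
  simp [pvWsA] at h

-- any '-->' occurrence strictly before next_newline fits inside the line bound
theorem pv_trip_le_nn (cs : List Char) (pos j : Nat) (_hj : pos ≤ j) (hjn : j < pvNN cs pos)
    (hp : pos ≤ cs.length) (ht : ['-', '-', '>'] <+: cs.drop j) : j + 3 ≤ pvNN cs pos := by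
  obtain ⟨g1, g2, g3, g4⟩ := pvNN_spec cs pos hp
  have c0 : cs[j + 0]? = some '-' := pv_prefix_getElem cs _ j 0 ht (by norm_num)
  have c1 : cs[j + 1]? = some '-' := pv_prefix_getElem cs _ j 1 ht (by norm_num)
  have c2 : cs[j + 2]? = some '>' := pv_prefix_getElem cs _ j 2 ht (by norm_num)
  by_contra hlt
  have h2 : j + 2 < cs.length := pv_lt_of_getElem? cs _ '>' c2
  rcases g4 with ge | gnl
  · omega
  · have : pvNN cs pos = j + 1 ∨ pvNN cs pos = j + 2 := by omega
    rcases this with he | he <;> rw [he] at gnl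
    · rw [c1] at gnl; simp at gnl
    · rw [c2] at gnl; simp at gnl

theorem pv_quad_le_nn (cs : List Char) (pos j : Nat) (_hj : pos ≤ j) (hjn : j < pvNN cs pos)
    (hp : pos ≤ cs.length) (ht : ['<', '!', '-', '-'] <+: cs.drop j) : j + 4 ≤ pvNN cs pos := by
  obtain ⟨g1, g2, g3, g4⟩ := pvNN_spec cs pos hp
  have c1 : cs[j + 1]? = some '!' := pv_prefix_getElem cs _ j 1 ht (by norm_num)
  have c2 : cs[j + 2]? = some '-' := pv_prefix_getElem cs _ j 2 ht (by norm_num)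
  have c3 : cs[j + 3]? = some '-' := pv_prefix_getElem cs _ j 3 ht (by norm_num)
  by_contra hlt
  have h2 : j + 3 < cs.length := pv_lt_of_getElem? cs _ '-' c3
  rcases g4 with ge | gnl
  · omega
  · have : pvNN cs pos = j + 1 ∨ pvNN cs pos = j + 2 ∨ pvNN cs pos = j + 3 := by omega
    rcases this with he | he | he <;> rw [he] at gnl
    · rw [c1] at gnl; simp at gnl
    · rw [c2] at gnl; simp at gnl
    · rw [c3] at gnl; simp at gnl

theorem pv_slice_eq_prefix (cs p : List Char) (i m : Nat) (hm : p.length = m) :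
    (PySem.Chars.slice cs (some (i : Int)) (some ((i : Int) + (m : Int))) = p) ↔
      p <+: cs.drop i := by
  rw [PySem.Chars.slice_eq_listSlice, PySem.List.slice_natCast_add cs i m, List.prefix_iff_eq_take, hm]
  exact eq_comm

theorem pv_pos_lt_nn (cs : List Char) (pos : Nat) (c : Char) (hp : pos < cs.length)
    (hc : cs[pos]? = some c) (hnl : c ≠ '\n') : pos < pvNN cs pos := by
  obtain ⟨g1, g2, g3, g4⟩ := pvNN_spec cs pos (by omega)
  rcases Nat.eq_or_lt_of_le g1 with he | hlt
  · exfalso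
    rcases g4 with ge | gnl
    · omega
    · rw [← he, hc] at gnl
      simp at gnl
      exact hnl gnl
  · exact hlt

-- ===== the five step lemmas for A's loop =====

theorem pvA_ws (cs : List Char) (pos : Nat) (ic : Bool) (c : Char) (hp : pos < cs.length)
    (hc : cs[pos]? = some c) (hw : pvWsA c = true) :
    pvLoopA cs pos ic = pvLoopA cs (pos + 1) ic := by
  have hgd : cs.getD pos ' ' = c := pv_getD_of_getElem? cs pos c hc
  by_cases hnl : c = '\n'
  · have hnn : pvNN cs pos = pos := by
      apply pvNN_unique cs pos pos (by omega) (le_refl _) (by omega)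
      · omega
      · right; rw [hc, hnl]
    have hskip : pvSkipA cs (pvNN cs pos) pos = pos := by
      rw [hnn]; exact pvSkipA_eq cs pos pos (by omega)
    have hskip2 : pvSkipA cs pos pos = pos := pvSkipA_eq cs pos pos (by omega)
    rw [pvLoopA]
    simp only [dif_pos hp, hnn, hskip2]
    rw [dif_neg (lt_irrefl pos)]
  · -- whitespace other than '\n': same line, same strip result
    have hlt : pos < pvNN cs pos := pv_pos_lt_nn cs pos c hp hc hnl
    by_cases hend : pos + 1 < cs.length
    · have hN : pvNN cs pos = pvNN cs (pos + 1) := by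
        apply pvNN_congr cs pos (pos + 1) (by omega) (by omega)
        intro i h1 h2
        rw [show i = pos by omega, hc]
        simp
        exact hnl
      have hS : pvSkipA cs (pvNN cs pos) pos = pvSkipA cs (pvNN cs pos) (pos + 1) := by
        apply pvSkipA_step cs _ pos hlt
        rw [hgd]; exact hw
      conv_lhs => rw [pvLoopA]
      conv_rhs => rw [pvLoopA]
      simp only [dif_pos hp, dif_pos hend]
      rw [← hN, ← hS]
    · -- pos + 1 = length: both sides finish the scan
      have hend' : pos + 1 = cs.length := by omega
      have hN : pvNN cs pos = cs.length := by
        apply pvNN_unique cs pos cs.length (by omega) (by omega) (le_refl _)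
        · intro i h1 h2
          rw [show i = pos by omega, hc]
          simp
          exact hnl
        · left; rfl
      have hS : pvSkipA cs cs.length pos = pos + 1 := by
        rw [← hN]
        rw [pvSkipA_step cs _ pos hlt (by rw [hgd]; exact hw)]
        apply pvSkipA_eq
        rw [hN]
        omega
      conv_lhs => rw [pvLoopA]
      simp only [dif_pos hp, hS, hN]
      rw [dif_neg (by omega : ¬ (pos + 1 < cs.length))]
      conv_lhs => rw [pvLoopA]
      conv_rhs => rw [pvLoopA]
      rw [dif_neg (by omega : ¬ (cs.length + 1 < cs.length)),
        dif_neg (by omega : ¬ (pos + 1 < cs.length))]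

theorem pv_ws_eq (c : Char) : pvWsB c = pvWsA c := rfl

theorem pv_slice3 (cs : List Char) (pos : Nat) :
    (PySem.Chars.slice cs (some (pos : Int)) (some ((pos : Int) + 3)) = ['-', '-', '>']) ↔
      ['-', '-', '>'] <+: cs.drop pos := by
  have h : ((pos : Int) + 3) = ((pos : Int) + ((3 : Nat) : Int)) := by norm_num
  rw [h]
  exact pv_slice_eq_prefix cs _ pos 3 rfl

theorem pv_slice4 (cs : List Char) (pos : Nat) :
    (PySem.Chars.slice cs (some (pos : Int)) (some ((pos : Int) + 4)) = ['<', '!', '-', '-']) ↔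
      ['<', '!', '-', '-'] <+: cs.drop pos := by
  have h : ((pos : Int) + 4) = ((pos : Int) + ((4 : Nat) : Int)) := by norm_num
  rw [h]
  exact pv_slice_eq_prefix cs _ pos 4 rfl

theorem pvA_close (cs : List Char) (pos : Nat) (c : Char) (hp : pos < cs.length)
    (hc : cs[pos]? = some c) (hw : pvWsA c = false)
    (ht : ['-', '-', '>'] <+: cs.drop pos) :
    pvLoopA cs pos true = pvLoopA cs (pos + 3) false := by
  have hgd : cs.getD pos ' ' = c := pv_getD_of_getElem? cs pos c hc
  have hnl : c ≠ '\n' := pv_ws_not_newline c hw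
  have hlt : pos < pvNN cs pos := pv_pos_lt_nn cs pos c hp hc hnl
  obtain ⟨g1, g2, g3, g4⟩ := pvNN_spec cs pos (by omega)
  have h3 : pos + 3 ≤ pvNN cs pos := pv_trip_le_nn cs pos pos (le_refl _) hlt (by omega) ht
  have hskip : pvSkipA cs (pvNN cs pos) pos = pos := by
    apply pvSkipA_eq
    rw [hgd, hw]
    simp
  have hce : PySem.Chars.findFrom cs ['-', '-', '>'] ((pos : Nat) : Int)
      (some ((pvNN cs pos : Nat) : Int)) = ((pos : Nat) : Int) := by
    apply pvBF_eq cs _ pos (pvNN cs pos) pos (by omega) g2 (le_refl _) (by simp; omega) ht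
    intro j h1 h2
    omega
  rw [pvLoopA]
  simp only [dif_pos hp, hskip]
  rw [dif_pos hlt]
  simp only [Bool.not_true, Bool.false_and, Bool.or_false, if_true, Bool.false_eq_true, if_false]
  rw [hce, dif_pos (by omega : ¬ ((pos : Int) = -1))]
  simp only [Int.toNat_natCast]

theorem pvA_incomment (cs : List Char) (pos : Nat) (c : Char) (hp : pos < cs.length)
    (hc : cs[pos]? = some c) (hw : pvWsA c = false)
    (ht : ¬ ['-', '-', '>'] <+: cs.drop pos) :
    pvLoopA cs pos true = pvLoopA cs (pos + 1) true := by
  have hgd : cs.getD pos ' ' = c := pv_getD_of_getElem? cs pos c hc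
  have hnl : c ≠ '\n' := pv_ws_not_newline c hw
  have hlt : pos < pvNN cs pos := pv_pos_lt_nn cs pos c hp hc hnl
  obtain ⟨g1, g2, g3, g4⟩ := pvNN_spec cs pos (by omega)
  have hskip : pvSkipA cs (pvNN cs pos) pos = pos := by
    apply pvSkipA_eq
    rw [hgd, hw]
    simp
  have hlen3 : (['-', '-', '>'] : List Char).length = 3 := rfl
  by_cases hend : pos + 1 < cs.length
  · have hN : pvNN cs pos = pvNN cs (pos + 1) := by
      apply pvNN_congr cs pos (pos + 1) (by omega) (by omega)
      intro i h1 h2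
      rw [show i = pos by omega, hc]
      simp
      exact hnl
    have hS1 : pos + 1 ≤ pvSkipA cs (pvNN cs pos) (pos + 1) := pvSkipA_ge cs _ _
    have hSle : pvSkipA cs (pvNN cs pos) (pos + 1) ≤ pvNN cs pos := pvSkipA_le cs _ _ (by omega)
    have hmid : ∀ j, pos ≤ j → j < pvSkipA cs (pvNN cs pos) (pos + 1) →
        ¬ (['-', '-', '>'] <+: cs.drop j ∧ j + (['-', '-', '>'] : List Char).length ≤ pvNN cs pos) := by
      intro j h1 h2 hand
      rcases Nat.eq_or_lt_of_le h1 with he | hlt2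
      · exact ht (he ▸ hand.1)
      · exact pv_ws_not_trip cs j (pvSkipA_ws cs (pvNN cs pos) (pos + 1) j (by omega) h2) hand.1
    have hce : PySem.Chars.findFrom cs ['-', '-', '>'] ((pos : Nat) : Int)
        (some ((pvNN cs pos : Nat) : Int)) =
        PySem.Chars.findFrom cs ['-', '-', '>'] ((pvSkipA cs (pvNN cs pos) (pos + 1) : Nat) : Int)
        (some ((pvNN cs pos : Nat) : Int)) :=
      pvBF_congr cs _ pos _ (pvNN cs pos) (by simp) (by omega) hSle g2 hmid
    conv_lhs => rw [pvLoopA]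
    simp only [dif_pos hp, hskip]
    rw [dif_pos hlt]
    simp only [Bool.not_true, Bool.false_and, Bool.or_false, if_true, Bool.false_eq_true, if_false]
    conv_rhs => rw [pvLoopA]
    simp only [dif_pos hend]
    rw [← hN]
    by_cases hSN : pvSkipA cs (pvNN cs pos) (pos + 1) < pvNN cs pos
    · rw [dif_pos hSN]
      simp only [Bool.not_true, Bool.false_and, Bool.or_false, if_true, Bool.false_eq_true, if_false]
      rw [hce]
    · rw [dif_neg hSN]
      have hSeq : pvSkipA cs (pvNN cs pos) (pos + 1) = pvNN cs pos := by omega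
      have hce2 : PySem.Chars.findFrom cs ['-', '-', '>'] ((pos : Nat) : Int)
          (some ((pvNN cs pos : Nat) : Int)) = -1 := by
        apply pvBF_neg cs _ pos (pvNN cs pos) (by simp) (by omega) g2
        intro j h1 h2
        rcases Nat.eq_or_lt_of_le h1 with he | hlt2
        · exact he ▸ ht
        · rw [hlen3] at h2
          exact pv_ws_not_trip cs j
            (pvSkipA_ws cs (pvNN cs pos) (pos + 1) j (by omega) (by omega))
      rw [hce2]
      rw [dif_neg (by simp)]
  · -- pos + 1 = length: the line has no room for '-->', both sides run off the end
    have hend' : pos + 1 = cs.length := by omega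
    have hN : pvNN cs pos = cs.length := by omega
    have hce2 : PySem.Chars.findFrom cs ['-', '-', '>'] ((pos : Nat) : Int)
        (some ((pvNN cs pos : Nat) : Int)) = -1 := by
      apply pvBF_neg cs _ pos (pvNN cs pos) (by simp) (by omega) g2
      intro j h1 h2
      rw [hlen3] at h2
      omega
    conv_lhs => rw [pvLoopA]
    simp only [dif_pos hp, hskip]
    rw [dif_pos hlt]
    simp only [Bool.not_true, Bool.false_and, Bool.or_false, if_true, Bool.false_eq_true, if_false]
    rw [hce2]
    rw [dif_neg (by simp)]
    rw [hN]
    conv_lhs => rw [pvLoopA]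
    conv_rhs => rw [pvLoopA]
    rw [dif_neg (by omega : ¬ (cs.length + 1 < cs.length)),
      dif_neg (by omega : ¬ (pos + 1 < cs.length))]

theorem pvA_open (cs : List Char) (pos : Nat) (c : Char) (hp : pos < cs.length)
    (hc : cs[pos]? = some c) (hw : pvWsA c = false)
    (hq : ['<', '!', '-', '-'] <+: cs.drop pos) :
    pvLoopA cs pos false = pvLoopA cs (pos + 4) true := by
  have hgd : cs.getD pos ' ' = c := pv_getD_of_getElem? cs pos c hc
  have hnl : c ≠ '\n' := pv_ws_not_newline c hw
  have hlt : pos < pvNN cs pos := pv_pos_lt_nn cs pos c hp hc hnl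
  obtain ⟨g1, g2, g3, g4⟩ := pvNN_spec cs pos (by omega)
  have h4 : pos + 4 ≤ pvNN cs pos := pv_quad_le_nn cs pos pos (le_refl _) hlt (by omega) hq
  have hskip : pvSkipA cs (pvNN cs pos) pos = pos := by
    apply pvSkipA_eq
    rw [hgd, hw]
    simp
  have hsw : PySem.Chars.startswith (cs.drop pos) ['<', '!', '-', '-'] = true :=
    (PySem.Chars.startswith_iff _ _).2 hq
  have hlen3 : (['-', '-', '>'] : List Char).length = 3 := rfl
  conv_lhs => rw [pvLoopA]
  simp only [dif_pos hp, hskip]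
  rw [dif_pos hlt]
  simp only [hsw, Bool.not_false, Bool.true_and, Bool.or_true, if_true]
  by_cases hend : pos + 4 < cs.length
  · have hN : pvNN cs pos = pvNN cs (pos + 4) := by
      apply pvNN_congr cs pos (pos + 4) (by omega) (by omega)
      intro i h1 h2
      have hi : i = pos ∨ i = pos + 1 ∨ i = pos + 2 ∨ i = pos + 3 := by omega
      have e0 : cs[pos + 0]? = some '<' := pv_prefix_getElem cs _ pos 0 hq (by norm_num)
      have e1 : cs[pos + 1]? = some '!' := pv_prefix_getElem cs _ pos 1 hq (by norm_num)
      have e2 : cs[pos + 2]? = some '-' := pv_prefix_getElem cs _ pos 2 hq (by norm_num)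
      have e3 : cs[pos + 3]? = some '-' := pv_prefix_getElem cs _ pos 3 hq (by norm_num)
      rw [Nat.add_zero] at e0
      rcases hi with he | he | he | he <;> subst he <;>
        first
          | (rw [e0]; simp)
          | (rw [e1]; simp)
          | (rw [e2]; simp)
          | (rw [e3]; simp)
    have hS1 : pos + 4 ≤ pvSkipA cs (pvNN cs pos) (pos + 4) := pvSkipA_ge cs _ _
    have hSle : pvSkipA cs (pvNN cs pos) (pos + 4) ≤ pvNN cs pos := pvSkipA_le cs _ _ (by omega)
    conv_rhs => rw [pvLoopA]
    simp only [dif_pos hend]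
    rw [← hN]
    by_cases hSN : pvSkipA cs (pvNN cs pos) (pos + 4) < pvNN cs pos
    · rw [dif_pos hSN]
      simp only [Bool.not_true, Bool.false_and, Bool.or_false, if_true, Bool.false_eq_true, if_false]
      have hce : PySem.Chars.findFrom cs ['-', '-', '>'] ((pos + 4 : Nat) : Int)
          (some ((pvNN cs pos : Nat) : Int)) =
          PySem.Chars.findFrom cs ['-', '-', '>'] ((pvSkipA cs (pvNN cs pos) (pos + 4) : Nat) : Int)
          (some ((pvNN cs pos : Nat) : Int)) := by
        apply pvBF_congr cs _ (pos + 4) _ (pvNN cs pos) (by simp) (by omega) hSle g2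
        intro j h1 h2 hand
        exact pv_ws_not_trip cs j (pvSkipA_ws cs (pvNN cs pos) (pos + 4) j (by omega) h2) hand.1
      rw [hce]
    · rw [dif_neg hSN]
      have hce2 : PySem.Chars.findFrom cs ['-', '-', '>'] ((pos + 4 : Nat) : Int)
          (some ((pvNN cs pos : Nat) : Int)) = -1 := by
        apply pvBF_neg cs _ (pos + 4) (pvNN cs pos) (by simp) (by omega) g2
        intro j h1 h2
        rw [hlen3] at h2
        exact pv_ws_not_trip cs j
          (pvSkipA_ws cs (pvNN cs pos) (pos + 4) j (by omega) (by omega))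
      rw [hce2]
      rw [dif_neg (by simp)]
  · -- pos + 4 = length (the '<!--' runs to the end of the text)
    have e3 : cs[pos + 3]? = some '-' := pv_prefix_getElem cs _ pos 3 hq (by norm_num)
    have hlen : pos + 4 ≤ cs.length := by
      have := pv_lt_of_getElem? cs _ '-' e3
      omega
    have hend' : pos + 4 = cs.length := by omega
    have hN : pvNN cs pos = cs.length := by omega
    have hce2 : PySem.Chars.findFrom cs ['-', '-', '>'] ((pos + 4 : Nat) : Int)
        (some ((pvNN cs pos : Nat) : Int)) = -1 := by
      apply pvBF_neg cs _ (pos + 4) (pvNN cs pos) (by simp) (by omega) g2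
      intro j h1 h2
      rw [hlen3] at h2
      omega
    rw [hce2]
    rw [dif_neg (by simp)]
    rw [hN]
    conv_lhs => rw [pvLoopA]
    conv_rhs => rw [pvLoopA]
    rw [dif_neg (by omega : ¬ (cs.length + 1 < cs.length)),
      dif_neg (by omega : ¬ (pos + 4 < cs.length))]

theorem pvA_ret (cs : List Char) (pos : Nat) (c : Char) (hp : pos < cs.length)
    (hc : cs[pos]? = some c) (hw : pvWsA c = false)
    (hq : ¬ ['<', '!', '-', '-'] <+: cs.drop pos) :
    pvLoopA cs pos false =
      (String.ofList (PySem.Chars.slice cs (some (pos : Int)) (some ((pvNN cs pos : Nat) : Int))),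
       if pvNN cs pos < cs.length then ((pvNN cs pos : Nat) : Int) + 1 else (cs.length : Int)) := by
  have hgd : cs.getD pos ' ' = c := pv_getD_of_getElem? cs pos c hc
  have hnl : c ≠ '\n' := pv_ws_not_newline c hw
  have hlt : pos < pvNN cs pos := pv_pos_lt_nn cs pos c hp hc hnl
  have hskip : pvSkipA cs (pvNN cs pos) pos = pos := by
    apply pvSkipA_eq
    rw [hgd, hw]
    simp
  have hsw : PySem.Chars.startswith (cs.drop pos) ['<', '!', '-', '-'] = false :=
    Bool.eq_false_iff.mpr (fun h => hq ((PySem.Chars.startswith_iff _ _).1 h))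
  rw [pvLoopA]
  simp only [dif_pos hp, hskip]
  rw [dif_pos hlt]
  simp only [hsw, Bool.not_false, Bool.true_and, Bool.or_false, Bool.false_eq_true, if_false]

theorem pv_main (cs : List Char) (k : Nat) : ∀ pos ic, cs.length - pos ≤ k →
    pvLoopA cs pos ic = pvLoopB cs pos ic := by
  induction k with
  | zero =>
    intro pos ic h
    rw [pvLoopA, pvLoopB, dif_neg (by omega : ¬ (pos < cs.length)),
      dif_neg (by omega : ¬ (pos < cs.length))]
  | succ k ih =>
    intro pos ic h
    by_cases hp : pos < cs.length
    · have hc : cs[pos]? = some cs[pos] := List.getElem?_eq_getElem hp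
      have hgd : cs.getD pos ' ' = cs[pos] := pv_getD_of_getElem? cs pos _ hc
      conv_rhs => rw [pvLoopB]
      simp only [dif_pos hp]
      cases ic with
      | true =>
        simp only [if_true]
        by_cases htr : ['-', '-', '>'] <+: cs.drop pos
        · rw [if_pos ((pv_slice3 cs pos).2 htr)]
          have hcm : cs[pos] = '-' := by
            have h0 := pv_prefix_getElem cs _ pos 0 htr (by norm_num)
            rw [Nat.add_zero, hc] at h0
            simpa using h0
          rw [pvA_close cs pos cs[pos] hp hc (by rw [hcm]; decide) htr]
          exact ih (pos + 3) false (by omega)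
        · rw [if_neg (fun hcond => htr ((pv_slice3 cs pos).1 hcond))]
          by_cases hw : pvWsA cs[pos] = true
          · rw [pvA_ws cs pos true cs[pos] hp hc hw]
            exact ih (pos + 1) true (by omega)
          · rw [pvA_incomment cs pos cs[pos] hp hc (Bool.eq_false_iff.mpr hw) htr]
            exact ih (pos + 1) true (by omega)
      | false =>
        simp only [Bool.false_eq_true, if_false]
        by_cases hw : pvWsA cs[pos] = true
        · rw [if_pos (by rw [pv_ws_eq, hgd]; exact hw)]
          rw [pvA_ws cs pos false cs[pos] hp hc hw]
          exact ih (pos + 1) false (by omega)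
        · rw [if_neg (by rw [pv_ws_eq, hgd]; exact hw)]
          by_cases hq : ['<', '!', '-', '-'] <+: cs.drop pos
          · rw [if_pos ((pv_slice4 cs pos).2 hq)]
            rw [pvA_open cs pos cs[pos] hp hc (Bool.eq_false_iff.mpr hw) hq]
            exact ih (pos + 4) true (by omega)
          · rw [if_neg (fun hcond => hq ((pv_slice4 cs pos).1 hcond))]
            rw [pvA_ret cs pos cs[pos] hp hc (Bool.eq_false_iff.mpr hw) hq]
            rcases pvNN_cases cs pos (by omega) with ⟨hf, hN⟩ | ⟨hf, hN⟩
            · rw [if_pos hf]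
              have hsl : PySem.Chars.slice cs (some (pos : Int)) (some ((pvNN cs pos : Nat) : Int)) =
                  PySem.Chars.slice cs (some (pos : Int)) := by
                rw [hN, PySem.Chars.slice_eq_listSlice, PySem.Chars.slice_eq_listSlice,
                  PySem.List.slice_natCast, PySem.List.slice_from_natCast,
                  ← List.length_drop, List.take_length]
              rw [hsl, hN]
              rw [if_neg (lt_irrefl cs.length)]
            · have hfne : ¬ (PySem.Chars.findFrom cs ['\n'] ((pos : Nat) : Int) = -1) := by
                rw [hf]; omega
              rw [if_neg hfne, hf, if_pos hN]
    · rw [pvLoopA, pvLoopB, dif_neg hp, dif_neg hp]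

-- ===== VERDICT (by name: the statement is the Claim_ definition above) =====
theorem find_markdown_body_start_spec : Claim_equal_find_markdown_body_start := by
  intro text _
  show _ = _
  unfold find_markdown_body_start find_markdown_body_start_alt
  exact pv_main text.toList text.toList.length 0 false (by omega)
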